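-- pv_equiv track=rewrite | github.com/RemiErr/2026-python | weeks/week-09/solutions/1111405012/question-10242.py | build_finish_order
-- ===== SOURCE A (Python) =====
-- def build_finish_order(graph):
--     node_count = len(graph) - 1
--     visited = [False] * (node_count + 1)
--     order = []
--
--     for start in range(1, node_count + 1):
--         if visited[start]:
--             continue
--
--         stack = [(start, 0)]
--         visited[start] = True
--
--         while stack:
--             node, edge_index = stack[-1]
--             if edge_index < len(graph[node]):
--                 next_node = graph[node][edge_index]
--                 stack[-1] = (node, edge_index + 1)
--                 if not visited[next_node]:
--                     visited[next_node] = True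
--                     stack.append((next_node, 0))
--             else:
--                 order.append(node)
--                 stack.pop()
--
--     return order
-- ===== SOURCE B (Python) =====
-- def build_finish_order(graph):
--     node_count = len(graph) - 1
--     visited = [False] * (node_count + 1)
--     order = []
--
--     for start in range(1, node_count + 1):
--         if visited[start]:
--             continue
--
--         visited[start] = True
--         stack = [(start, graph[start])]
--
--         while stack:
--             node, pending = stack.pop()
--             for i, nxt in enumerate(pending):
--                 if not visited[nxt]:
--                     visited[nxt] = True
--                     stack.append((node, pending[i + 1:]))
--                     stack.append((nxt, graph[nxt]))
--                     break
--             else: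
--                 order.append(node)
--
--     return order
-- ===== Notes on version B (the rewrite author's own statement) =====
-- stated objective: alternative
-- what changed: A advances a (node, edge_index) counter in the stack's top frame in place, one edge per while-iteration; B pops a frame holding the remaining-neighbour suffix, scans it with an inner for/enumerate/break-else loop for the first unvisited child, and re-pushes the sliced-off suffix, so every while-iteration either descends or finishes a node.
import Mathlib
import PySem

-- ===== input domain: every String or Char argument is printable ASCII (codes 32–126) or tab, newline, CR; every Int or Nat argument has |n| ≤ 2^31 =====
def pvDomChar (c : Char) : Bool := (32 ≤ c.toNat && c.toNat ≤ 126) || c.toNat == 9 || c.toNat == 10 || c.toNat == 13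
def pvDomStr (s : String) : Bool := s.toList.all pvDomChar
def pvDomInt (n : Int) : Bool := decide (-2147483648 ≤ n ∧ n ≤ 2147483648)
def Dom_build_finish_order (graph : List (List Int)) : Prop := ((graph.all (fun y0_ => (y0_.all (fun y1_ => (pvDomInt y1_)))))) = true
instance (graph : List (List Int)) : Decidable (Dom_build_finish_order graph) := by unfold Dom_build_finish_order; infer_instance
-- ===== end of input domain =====

-- B replaces A's peek-and-increment (node, edge_index) stack frames by pop/re-push frames carrying the
-- remaining-neighbour suffix, scanned for the first unvisited child in one inner loop (objective: alternative).

-- number of still-unvisited slots; both loops' termination measures use it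
def pvCFalse (vis : List Bool) : Nat := vis.countP (fun b => !b)

theorem pvCFalse_set_lt (l : List Bool) (k : Nat) (hk : l[k]? = some false) :
    pvCFalse (l.set k true) < pvCFalse l := by
  induction l generalizing k with
  | nil => simp at hk
  | cons b t ih =>
    cases k with
    | zero => simp_all [pvCFalse]
    | succ k =>
      simp only [List.getElem?_cons_succ] at hk
      have := ih k hk
      simp only [pvCFalse, List.set_cons_succ, List.countP_cons] at *
      omega

-- marking a slot that currently reads False strictly shrinks pvCFalse (any Python index, also negative)
theorem pvCFalse_pySetD_lt (vis : List Bool) (i : Int)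
    (h : PySem.List.pyGet? vis i = some false) :
    pvCFalse (PySem.List.pySetD vis i true) < pvCFalse vis := by
  unfold PySem.List.pyGet? at h
  cases hk : PySem.List.pyIdx? vis.length i with
  | none => rw [hk] at h; simp at h
  | some k =>
    rw [hk] at h; simp only [Option.bind_some] at h
    simp only [PySem.List.pySetD, PySem.List.pySet?, hk, Option.map_some, Option.getD_some]
    exact pvCFalse_set_lt vis k h

-- ===== PORT A =====
-- A's inner while loop; the stack top is the list head, a frame is (node, edge_index).
-- graph[node] / visited[...] are ported with pyGetD/pyGet?/pySetD; where the Python raises IndexError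
-- (excluded by Pre_) pyGet? returns none and the port skips that edge.
def pvA_loop (graph : List (List Int)) :
    List (Int × Nat) → List Bool → List Int → List Bool × List Int
  | [], vis, ord => (vis, ord)
  | (node, ei) :: rest, vis, ord =>
    if h : ei < (PySem.List.pyGetD graph node []).length then
      match hv : PySem.List.pyGet? vis ((PySem.List.pyGetD graph node [])[ei]) with
      | some false =>
          pvA_loop graph (((PySem.List.pyGetD graph node [])[ei], 0) :: (node, ei + 1) :: rest)
            (PySem.List.pySetD vis ((PySem.List.pyGetD graph node [])[ei]) true) ord
      | _ => pvA_loop graph ((node, ei + 1) :: rest) vis ord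
    else
      pvA_loop graph rest vis (ord ++ [node])
  termination_by s vis _ =>
    (pvCFalse vis, (s.map (fun f => (PySem.List.pyGetD graph f.1 []).length - f.2 + 1)).sum)
  decreasing_by
  · exact Prod.Lex.left _ _ (pvCFalse_pySetD_lt _ _ hv)
  · apply Prod.Lex.right
    simp only [List.map_cons, List.sum_cons]
    omega
  · apply Prod.Lex.right
    simp only [List.map_cons, List.sum_cons]
    omega

def build_finish_order (graph : List (List Int)) : List Int :=
  let node_count : Int := (graph.length : Int) - 1
  let init : List Bool × List Int := (List.replicate (node_count + 1).toNat false, [])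
  ((PySem.List.pyRange 1 (node_count + 1) 1).foldl
    (fun st start =>
      if PySem.List.pyGetD st.1 start false then st
      else pvA_loop graph [(start, 0)] (PySem.List.pySetD st.1 start true) st.2)
    init).2

-- ===== PORT B =====
-- B's inner for/enumerate/break scan: the first unvisited entry of the pending suffix, with the rest of it
def pvB_findChild (vis : List Bool) : List Int → Option (Int × List Int)
  | [] => none
  | nxt :: rest =>
    match PySem.List.pyGet? vis nxt with
    | some false => some (nxt, rest)
    | _ => pvB_findChild vis rest

-- termination helper for pvB_loop: a found child currently reads unvisited
theorem pvB_findChild_some (vis : List Bool) (p : List Int) (c : Int) (s : List Int)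
    (h : pvB_findChild vis p = some (c, s)) : PySem.List.pyGet? vis c = some false := by
  induction p with
  | nil => simp [pvB_findChild] at h
  | cons nxt rest ih =>
    unfold pvB_findChild at h
    cases hv : PySem.List.pyGet? vis nxt with
    | none => rw [hv] at h; exact ih h
    | some b =>
      cases b with
      | false => rw [hv] at h; simp at h; rw [h.1] at hv; exact hv
      | true => rw [hv] at h; exact ih h

-- B's while loop: pop (node, pending); either mark the first unvisited child and push
-- (node, rest-of-pending) and (child, graph[child]), or finish node (for/else) when none remains.
def pvB_loop (graph : List (List Int)) :
    List (Int × List Int) → List Bool → List Int → List Bool × List Int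
  | [], vis, ord => (vis, ord)
  | (node, pending) :: rest, vis, ord =>
    match hfc : pvB_findChild vis pending with
    | some (nxt, suf) =>
        pvB_loop graph ((nxt, PySem.List.pyGetD graph nxt []) :: (node, suf) :: rest)
          (PySem.List.pySetD vis nxt true) ord
    | none => pvB_loop graph rest vis (ord ++ [node])
  termination_by s vis _ => (pvCFalse vis, (s.map (fun f => f.2.length + 1)).sum)
  decreasing_by
  · exact Prod.Lex.left _ _ (pvCFalse_pySetD_lt _ _ (pvB_findChild_some _ _ _ _ hfc))
  · apply Prod.Lex.right
    simp only [List.map_cons, List.sum_cons]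
    omega

def build_finish_order_alt (graph : List (List Int)) : List Int :=
  let node_count : Int := (graph.length : Int) - 1
  let init : List Bool × List Int := (List.replicate (node_count + 1).toNat false, [])
  ((PySem.List.pyRange 1 (node_count + 1) 1).foldl
    (fun st start =>
      if PySem.List.pyGetD st.1 start false then st
      else pvB_loop graph [(start, PySem.List.pyGetD graph start [])]
        (PySem.List.pySetD st.1 start true) st.2)
    init).2

-- ===== PRECONDITION & SPEC =====
-- Exactly where Python A returns (no IndexError): every adjacency entry of rows 1.. is a valid Python
-- index into graph, and row 0's entries are valid too whenever some row 1.. references node 0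
-- (via entry 0 or its negative alias -len(graph)), since only then row 0 is ever scanned.
def Pre_build_finish_order (graph : List (List Int)) : Prop :=
  (∀ row ∈ graph.drop 1, ∀ e ∈ row, -(graph.length : Int) ≤ e ∧ e < (graph.length : Int)) ∧
  ((∃ row ∈ graph.drop 1, (0 : Int) ∈ row ∨ -(graph.length : Int) ∈ row) →
    ∀ e ∈ graph.headD [], -(graph.length : Int) ≤ e ∧ e < (graph.length : Int))
instance (graph : List (List Int)) : Decidable (Pre_build_finish_order graph) := by
  unfold Pre_build_finish_order; infer_instance

def pvWitness_build_finish_order : List (List Int) := [[], [2], [1]]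

def Spec_build_finish_order (graph : List (List Int)) (out : List Int) : Prop := out = build_finish_order_alt graph
instance (graph : List (List Int)) (out : List Int) : Decidable (Spec_build_finish_order graph out) := by unfold Spec_build_finish_order; infer_instance

-- ===== CLAIM (what is proved, stated in full; the proofs are below) =====
def Claim_equal_build_finish_order : Prop := ∀ (graph : List (List Int)), Dom_build_finish_order graph → Pre_build_finish_order graph → Spec_build_finish_order graph (build_finish_order graph)

-- ===== LEMMAS AND PROOFS =====

-- the A frame (node, edge_index) corresponds to the B frame carrying the unexamined neighbour suffix
def pvToB (graph : List (List Int)) (f : Int × Nat) : Int × List Int :=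
  (f.1, (PySem.List.pyGetD graph f.1 []).drop f.2)

-- B's loop looks at a pending list only through pvB_findChild
theorem pvB_loop_congr (graph : List (List Int)) (n : Int) (p₁ p₂ : List Int)
    (r : List (Int × List Int)) (vis : List Bool) (ord : List Int)
    (h : pvB_findChild vis p₁ = pvB_findChild vis p₂) :
    pvB_loop graph ((n, p₁) :: r) vis ord = pvB_loop graph ((n, p₂) :: r) vis ord := by
  rw [pvB_loop, pvB_loop, h]

-- simulation: A's stack machine equals B's on corresponding stacks
theorem pvSim (graph : List (List Int)) (s : List (Int × Nat)) (vis : List Bool) (ord : List Int) :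
    pvA_loop graph s vis ord = pvB_loop graph (s.map (pvToB graph)) vis ord := by
  induction s, vis, ord using pvA_loop.induct graph with
  | case1 vis ord => rw [pvA_loop]; rw [List.map_nil, pvB_loop]
  | case2 node ei rest vis ord h hv ih =>
      rw [pvA_loop, dif_pos h, hv]
      dsimp only
      rw [ih]
      have hdrop : (PySem.List.pyGetD graph node []).drop ei
          = (PySem.List.pyGetD graph node [])[ei] :: (PySem.List.pyGetD graph node []).drop (ei + 1) :=
        List.drop_eq_getElem_cons h
      have hfc : pvB_findChild vis ((PySem.List.pyGetD graph node []).drop ei)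
          = some ((PySem.List.pyGetD graph node [])[ei], (PySem.List.pyGetD graph node []).drop (ei + 1)) := by
        rw [hdrop, pvB_findChild, hv]
      have hr : pvB_loop graph (List.map (pvToB graph) ((node, ei) :: rest)) vis ord
          = pvB_loop graph
              (List.map (pvToB graph) (((PySem.List.pyGetD graph node [])[ei], 0) :: (node, ei + 1) :: rest))
              (PySem.List.pySetD vis ((PySem.List.pyGetD graph node [])[ei]) true) ord := by
        rw [List.map_cons]
        dsimp only [pvToB]
        rw [pvB_loop, hfc]
        simp [pvToB]
      exact hr.symm
  | case3 node ei rest vis ord h hv ih =>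
      rw [pvA_loop, dif_pos h]
      split
      · next heq => exact absurd heq hv
      · rw [ih]
        have hdrop : (PySem.List.pyGetD graph node []).drop ei
            = (PySem.List.pyGetD graph node [])[ei] :: (PySem.List.pyGetD graph node []).drop (ei + 1) :=
          List.drop_eq_getElem_cons h
        have hfc : pvB_findChild vis ((PySem.List.pyGetD graph node []).drop (ei + 1))
            = pvB_findChild vis ((PySem.List.pyGetD graph node []).drop ei) := by
          rw [hdrop, pvB_findChild]
          rcases hg : PySem.List.pyGet? vis ((PySem.List.pyGetD graph node [])[ei]) with _ | b
          · rfl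
          · cases b
            · exact absurd hg hv
            · rfl
        rw [List.map_cons, List.map_cons]
        dsimp only [pvToB]
        exact pvB_loop_congr graph node _ _ _ vis ord hfc
  | case4 node ei rest vis ord h ih =>
      rw [pvA_loop, dif_neg h, ih]
      have hfc : pvB_findChild vis ((PySem.List.pyGetD graph node []).drop ei) = none := by
        rw [List.drop_eq_nil_of_le (by omega), pvB_findChild]
      have hr : pvB_loop graph (List.map (pvToB graph) ((node, ei) :: rest)) vis ord
          = pvB_loop graph (List.map (pvToB graph) rest) vis (ord ++ [node]) := by
        rw [List.map_cons]
        dsimp only [pvToB]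
        rw [pvB_loop, hfc]
      exact hr.symm

-- ===== VERDICT (by name: the statement is the Claim_ definition above) =====
theorem build_finish_order_spec : Claim_equal_build_finish_order := by
  intro graph _ _
  unfold Spec_build_finish_order build_finish_order build_finish_order_alt
  have hstep : (fun (st : List Bool × List Int) (start : Int) =>
        if PySem.List.pyGetD st.1 start false then st
        else pvA_loop graph [(start, 0)] (PySem.List.pySetD st.1 start true) st.2)
      = (fun (st : List Bool × List Int) (start : Int) =>
        if PySem.List.pyGetD st.1 start false then st
        else pvB_loop graph [(start, PySem.List.pyGetD graph start [])]
          (PySem.List.pySetD st.1 start true) st.2) := by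
    funext st start
    by_cases hg : PySem.List.pyGetD st.1 start false = true
    · simp only [hg, if_true]
    · simp only [hg, if_false, Bool.false_eq_true]
      rw [pvSim]
      simp [pvToB]
  rw [hstep]
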